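-- pv_equiv track=rewrite | github.com/wilmurillo-ai/Design-Assistant | .skills/openclaw-skills/skills/ivy-end/apple-calendar-ops/scripts/calendar_common.py | unfold_ics_lines
-- ===== SOURCE A (Python) =====
-- from typing import Any, Dict, List, Optional, Tuple
--
-- def unfold_ics_lines(text: str) -> List[str]:
--     raw_lines = text.replace('\r\n', '\n').replace('\r', '\n').split('\n')
--     lines: List[str] = []
--     for line in raw_lines:
--         if not line:
--             continue
--         if line.startswith((' ', '\t')) and lines:
--             lines[-1] += line[1:]
--         else:
--             lines.append(line)
--     return lines
-- ===== SOURCE B (Python) =====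
-- def unfold_ics_lines(text):
--     lines = [l for l in text.replace('\r\n', '\n').replace('\r', '\n').split('\n') if l]
--     if not lines:
--         return []
--     return '\n'.join(lines).replace('\n ', '').replace('\n\t', '').split('\n')
-- ===== Notes on version B (the rewrite author's own statement) =====
-- stated objective: idiomatic
-- what changed: B replaces A's stateful per-line loop (conditional append / mutate-last) with a whole-string strategy: drop empty lines, join with newlines, delete every fold marker (newline followed by one space or tab) with str.replace, and split back.
import Mathlib
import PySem

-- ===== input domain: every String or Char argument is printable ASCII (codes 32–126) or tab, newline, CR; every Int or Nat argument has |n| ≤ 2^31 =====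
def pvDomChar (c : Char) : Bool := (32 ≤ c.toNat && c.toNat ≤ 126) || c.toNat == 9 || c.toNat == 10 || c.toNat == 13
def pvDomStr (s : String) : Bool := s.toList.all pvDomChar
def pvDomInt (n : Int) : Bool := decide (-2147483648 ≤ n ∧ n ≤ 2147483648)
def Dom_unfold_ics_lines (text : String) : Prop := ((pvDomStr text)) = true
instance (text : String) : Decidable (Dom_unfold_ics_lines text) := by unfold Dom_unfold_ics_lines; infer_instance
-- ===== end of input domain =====

-- B drops empty lines, joins them with '\n', deletes every fold marker ('\n' plus one space or
-- tab) with str.replace, and splits back, instead of A's per-line conditional append/mutate loop;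
-- objective: idiomatic.

-- ===== PORT A =====
-- one step of A's forward loop (lines is the accumulator, line the current raw line)
def pvStepA (lines : List (List Char)) (line : List Char) : List (List Char) :=
  if line = [] then lines
  else if (PySem.Chars.startswith line [' '] || PySem.Chars.startswith line ['\t'])
          && !lines.isEmpty then
    lines.dropLast ++ [lines.getLastD [] ++ PySem.Chars.slice line (some 1) none]
  else lines ++ [line]

def unfold_ics_lines (text : String) : List String :=
  let raw := PySem.Chars.splitOn
    (PySem.Chars.replace (PySem.Chars.replace text.toList ['\r', '\n'] ['\n']) ['\r'] ['\n'])
    ['\n']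
  (raw.foldl pvStepA []).map String.mk

-- ===== PORT B =====
def unfold_ics_lines_alt (text : String) : List String :=
  let raw := PySem.Chars.splitOn
    (PySem.Chars.replace (PySem.Chars.replace text.toList ['\r', '\n'] ['\n']) ['\r'] ['\n'])
    ['\n']
  let lines := raw.filter (fun l => !l.isEmpty)
  if lines.isEmpty then []
  else
    (PySem.Chars.splitOn
      (PySem.Chars.replace
        (PySem.Chars.replace (PySem.Chars.join ['\n'] lines) ['\n', ' '] [])
        ['\n', '\t'] [])
      ['\n']).map String.mk

-- ===== PRECONDITION & SPEC =====
def Spec_unfold_ics_lines (text : String) (out : List String) : Prop := out = unfold_ics_lines_alt text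
instance (text : String) (out : List String) : Decidable (Spec_unfold_ics_lines text out) := by unfold Spec_unfold_ics_lines; infer_instance

-- ===== CLAIM =====
def Claim_equal_unfold_ics_lines : Prop := ∀ (text : String), Dom_unfold_ics_lines text → Spec_unfold_ics_lines text (unfold_ics_lines text)

-- ===== LEMMAS AND PROOFS =====

-- is the line a folded continuation line?
def pvIsFold : List Char → Bool
  | [] => false
  | c :: _ => c = ' ' || c = '\t'

-- reference unfolding of a nonempty-line list: spec1 cur ls appends fold tails to cur
def pvSpec1 (cur : List Char) : List (List Char) → List (List Char)
  | [] => [cur]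
  | l :: rest => if pvIsFold l then pvSpec1 (cur ++ l.tail) rest else cur :: pvSpec1 l rest

def pvSpec : List (List Char) → List (List Char)
  | [] => []
  | l :: rest => pvSpec1 l rest

theorem pvIsFold_eq (l : List Char) :
    (PySem.Chars.startswith l [' '] || PySem.Chars.startswith l ['\t']) = pvIsFold l := by
  cases l with
  | nil => simp [PySem.Chars.startswith, pvIsFold]
  | cons c cs =>
    by_cases h1 : c = ' '
    · simp [PySem.Chars.startswith, pvIsFold, List.isPrefixOf, h1]
    · by_cases h2 : c = '\t'
      · simp [PySem.Chars.startswith, pvIsFold, List.isPrefixOf, h2]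
      · simp [PySem.Chars.startswith, pvIsFold, List.isPrefixOf, h1, h2,
          Ne.symm h1, Ne.symm h2]

theorem pvSlice_one (l : List Char) : PySem.List.slice l (some 1) none = l.tail := by
  have := PySem.List.slice_from (xs := l) (a := (1 : Int))
  simp at this
  simp [this]

-- A's loop over nonempty lines computes pvSpec1
theorem pvFoldA_spec1 (ls : List (List Char)) (hne : ∀ l ∈ ls, l ≠ []) :
    ∀ (acc : List (List Char)) (cur : List Char),
      List.foldl pvStepA (acc ++ [cur]) ls = acc ++ pvSpec1 cur ls := by
  induction ls with
  | nil => intro acc cur; simp [pvSpec1]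
  | cons l rest ih =>
    intro acc cur
    have hrest : ∀ x ∈ rest, x ≠ [] := fun x hx => hne x (List.mem_cons_of_mem _ hx)
    have hl : l ≠ [] := hne l List.mem_cons_self
    simp only [List.foldl_cons, pvSpec1]
    by_cases h : pvIsFold l = true
    · have hstep : pvStepA (acc ++ [cur]) l = acc ++ [cur ++ l.tail] := by
        simp [pvStepA, hl, pvIsFold_eq, h, pvSlice_one]
      rw [hstep, ih hrest acc (cur ++ l.tail), h]; simp
    · have hb : pvIsFold l = false := by simpa using h
      have hstep : pvStepA (acc ++ [cur]) l = (acc ++ [cur]) ++ [l] := by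
        simp [pvStepA, hl, pvIsFold_eq, hb]
      rw [hstep, ih hrest (acc ++ [cur]) l, hb]; simp

theorem pvFoldA (ls : List (List Char)) (hne : ∀ l ∈ ls, l ≠ []) :
    List.foldl pvStepA [] ls = pvSpec ls := by
  cases ls with
  | nil => rfl
  | cons l rest =>
    have hl : l ≠ [] := hne l List.mem_cons_self
    have h1 : pvStepA [] l = [l] := by simp [pvStepA, hl]
    simp only [List.foldl_cons, h1, pvSpec]
    have := pvFoldA_spec1 rest (fun x hx => hne x (List.mem_cons_of_mem _ hx)) [] l
    simpa using this

-- A's loop skips empty lines: the guarded step function coincides with the step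
theorem pvStepA_guard :
    (fun (x : List (List Char)) (y : List Char) => if !y.isEmpty then pvStepA x y else x)
      = pvStepA := by
  funext x y; cases y <;> simp [pvStepA]

theorem pvFilter_ne (raw : List (List Char)) :
    ∀ l ∈ raw.filter (fun l => !l.isEmpty), l ≠ [] := by
  intro l hl
  have := (List.mem_filter.mp hl).2
  cases l <;> simp_all

-- ---------- B-side reference functions ----------

-- a "good" line: nonempty and newline-free
def pvGood (l : List Char) : Prop := l ≠ [] ∧ '\n' ∉ l

-- '\n'.join as a structural function
def pvMyJ : List (List Char) → List Char
  | [] => []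
  | l :: rest => l ++ rest.flatMap (fun m => '\n' :: m)

-- split on '\n': (first piece, remaining pieces)
def pvSplitP : List Char → List Char × List (List Char)
  | [] => ([], [])
  | c :: t => if c = '\n' then ([], (pvSplitP t).1 :: (pvSplitP t).2)
              else (c :: (pvSplitP t).1, (pvSplitP t).2)

-- s.replace('\n' + c, '') as a structural function
def pvRepl (c : Char) : List Char → List Char
  | [] => []
  | [a] => [a]
  | a :: b :: t => if a = '\n' ∧ b = c then pvRepl c t else a :: pvRepl c (b :: t)

-- merge every line whose first char is c into the previous line
def pvGoC (c : Char) : List Char → List (List Char) → List (List Char)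
  | cur, [] => [cur]
  | cur, l :: rest => if l.head? = some c then pvGoC c (cur ++ l.tail) rest
                      else cur :: pvGoC c l rest

def pvMergeC (c : Char) : List (List Char) → List (List Char)
  | [] => []
  | l :: rest => pvGoC c l rest

-- leading run of c-headed lines: concatenated tails / remaining lines
def pvTailsC (c : Char) : List (List Char) → List Char
  | [] => []
  | l :: rest => if l.head? = some c then l.tail ++ pvTailsC c rest else []

def pvDropC (c : Char) : List (List Char) → List (List Char)
  | [] => []
  | l :: rest => if l.head? = some c then pvDropC c rest else l :: rest

-- ---------- characterizations of the PySem scanners ----------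

theorem pvReplGo (c : Char) :
    ∀ (fuel : Nat) (l acc : List Char), l.length ≤ fuel →
      PySem.Chars.replace.go ['\n', c] [] fuel l acc = acc.reverse ++ pvRepl c l := by
  intro fuel
  induction fuel with
  | zero =>
    intro l acc hl
    have hnil : l = [] := by cases l <;> simp_all
    subst hnil
    rw [PySem.Chars.replace.go.eq_def]; simp [pvRepl]
  | succ n ih =>
    intro l acc hl
    cases l with
    | nil => rw [PySem.Chars.replace.go.eq_def]; simp [pvRepl]
    | cons a t =>
      rw [PySem.Chars.replace.go.eq_def]
      by_cases hp : List.isPrefixOf ['\n', c] (a :: t) = true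
      · obtain ⟨b, t', rfl⟩ : ∃ b t', t = b :: t' := by
          cases t with
          | nil => simp [List.isPrefixOf] at hp
          | cons b t' => exact ⟨b, t', rfl⟩
        have hab : a = '\n' ∧ b = c := by
          simp [List.isPrefixOf] at hp; exact ⟨hp.1.symm, hp.2.symm⟩
        simp only [hp, if_true]
        have ht' : t'.length ≤ n := by simp at hl; omega
        rw [show List.drop (['\n', c] : List Char).length (a :: b :: t') = t' from rfl]
        rw [ih t' _ ht']
        simp [pvRepl, hab]
      · simp only [hp, Bool.false_eq_true, if_false]
        have ht : t.length ≤ n := by simp at hl; omega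
        rw [ih t _ ht]
        cases t with
        | nil => simp [pvRepl]
        | cons b t' =>
          have hnab : ¬ (a = '\n' ∧ b = c) := by
            intro hq
            obtain ⟨h1, h2⟩ := hq
            subst h1; subst h2; simp [List.isPrefixOf] at hp
          simp [pvRepl, hnab]

theorem pvReplaceEq (c : Char) (s : List Char) :
    PySem.Chars.replace s ['\n', c] [] = pvRepl c s := by
  rw [PySem.Chars.replace]
  simpa using pvReplGo c s.length s [] (le_refl _)

theorem pvSplitGo :
    ∀ (fuel : Nat) (l cur : List Char) (acc : List (List Char)), l.length < fuel →
      PySem.Chars.splitOn.go ['\n'] fuel l cur acc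
        = acc.reverse ++ (cur.reverse ++ (pvSplitP l).1) :: (pvSplitP l).2 := by
  intro fuel
  induction fuel with
  | zero => intro l cur acc hl; omega
  | succ n ih =>
    intro l cur acc hl
    cases l with
    | nil => rw [PySem.Chars.splitOn.go.eq_def]; simp [pvSplitP]
    | cons a t =>
      rw [PySem.Chars.splitOn.go.eq_def]
      by_cases ha : a = '\n'
      · subst ha
        have hp : List.isPrefixOf ['\n'] ('\n' :: t) = true := by simp [List.isPrefixOf]
        simp only [hp, if_true]
        have ht : t.length < n := by simp at hl; omega
        rw [show List.drop (['\n'] : List Char).length ('\n' :: t) = t from rfl]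
        rw [ih t [] _ ht]
        simp [pvSplitP]
      · have hp : List.isPrefixOf ['\n'] (a :: t) = false := by
          simp [List.isPrefixOf]; exact fun h => absurd h.symm ha
        simp only [hp, Bool.false_eq_true, if_false]
        have ht : t.length < n := by simp at hl; omega
        rw [ih t (a :: cur) _ ht]
        simp [pvSplitP, ha]

theorem pvSplitOnEq (s : List Char) :
    PySem.Chars.splitOn s ['\n'] = (pvSplitP s).1 :: (pvSplitP s).2 := by
  rw [PySem.Chars.splitOn]
  simpa using pvSplitGo (s.length + 1) s [] [] (by omega)

theorem pvJoinEq_aux : ∀ (t : List (List Char)) (a : List Char),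
    (['\n'] : List Char).intercalate (a :: t) = a ++ t.flatMap (fun m => '\n' :: m) := by
  intro t
  induction t with
  | nil => intro a; simp [List.intercalate]
  | cons b t' ih =>
    intro a
    have h : (['\n'] : List Char).intercalate (a :: b :: t')
        = a ++ '\n' :: (['\n'] : List Char).intercalate (b :: t') := by
      simp [List.intercalate, List.intersperse]
    rw [h, ih b]
    simp

theorem pvJoinEq (ls : List (List Char)) : PySem.Chars.join ['\n'] ls = pvMyJ ls := by
  cases ls with
  | nil => simp [PySem.Chars.join, List.intercalate, pvMyJ]
  | cons a t => rw [PySem.Chars.join, pvJoinEq_aux]; rfl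

-- ---------- pieces of a split are newline-free ----------

theorem pvSplitP_good (l : List Char) :
    '\n' ∉ (pvSplitP l).1 ∧ ∀ p ∈ (pvSplitP l).2, '\n' ∉ p := by
  induction l with
  | nil => simp [pvSplitP]
  | cons a t ih =>
    by_cases ha : a = '\n'
    · subst ha
      refine ⟨by simp [pvSplitP], ?_⟩
      intro p hp
      simp only [pvSplitP, if_pos rfl] at hp
      rcases List.mem_cons.mp hp with h | h
      · subst h; exact ih.1
      · exact ih.2 p h
    · refine ⟨?_, ?_⟩
      · simp only [pvSplitP, if_neg ha]
        intro hmem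
        rcases List.mem_cons.mp hmem with h | h
        · exact ha h.symm
        · exact ih.1 h
      · intro p hp
        simp only [pvSplitP, if_neg ha] at hp
        exact ih.2 p hp

-- ---------- pvRepl on joined good lines merges the c-headed lines ----------

theorem pvRepl_cons (c a : Char) (z : List Char) (ha : a ≠ '\n') :
    pvRepl c (a :: z) = a :: pvRepl c z := by
  cases z with
  | nil => simp [pvRepl]
  | cons b t =>
    have hn : ¬ (a = '\n' ∧ b = c) := fun h => ha h.1
    simp [pvRepl, hn]

theorem pvRepl_skip (c : Char) (w r : List Char) (hw : '\n' ∉ w) :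
    pvRepl c (w ++ r) = w ++ pvRepl c r := by
  induction w with
  | nil => simp
  | cons a w' ih =>
    have ha : a ≠ '\n' := by intro h; subst h; simp at hw
    have hw' : '\n' ∉ w' := by simp at hw; exact hw.2
    simp only [List.cons_append]
    rw [pvRepl_cons c a _ ha, ih hw']

theorem pvGoC_eq (c : Char) :
    ∀ (rest : List (List Char)) (cur : List Char),
      pvGoC c cur rest = (cur ++ pvTailsC c rest) :: pvMergeC c (pvDropC c rest) := by
  intro rest
  induction rest with
  | nil => intro cur; simp [pvGoC, pvTailsC, pvDropC, pvMergeC]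
  | cons l r ih =>
    intro cur
    by_cases h : l.head? = some c
    · simp [pvGoC, pvTailsC, pvDropC, h, ih]
    · simp [pvGoC, pvTailsC, pvDropC, h, pvMergeC]

theorem pvRepl_join_aux (c : Char) :
    ∀ (rest : List (List Char)), (∀ m ∈ rest, pvGood m) →
      ∀ (cur : List Char), '\n' ∉ cur →
        pvRepl c (cur ++ rest.flatMap (fun m => '\n' :: m)) = pvMyJ (pvGoC c cur rest) := by
  intro rest
  induction rest with
  | nil =>
    intro _ cur hcur
    simp only [List.flatMap_nil, List.append_nil, pvGoC, pvMyJ]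
    have := pvRepl_skip c cur [] hcur
    simpa [pvRepl] using this
  | cons m r ih =>
    intro hg cur hcur
    have hm : pvGood m := hg m List.mem_cons_self
    have hr : ∀ x ∈ r, pvGood x := fun x hx => hg x (List.mem_cons_of_mem _ hx)
    obtain ⟨b, mt, rfl⟩ : ∃ b mt, m = b :: mt := by
      cases m with
      | nil => exact absurd rfl hm.1
      | cons b mt => exact ⟨b, mt, rfl⟩
    have hb : b ≠ '\n' := by intro h; subst h; exact hm.2 List.mem_cons_self
    have hmt : '\n' ∉ mt := fun h => hm.2 (List.mem_cons_of_mem _ h)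
    simp only [List.flatMap_cons]
    rw [show cur ++ (('\n' :: b :: mt) ++ r.flatMap (fun m => '\n' :: m))
          = cur ++ '\n' :: b :: (mt ++ r.flatMap (fun m => '\n' :: m)) by simp,
        pvRepl_skip c cur _ hcur]
    by_cases hbc : b = c
    · have h1 : pvRepl c ('\n' :: b :: (mt ++ r.flatMap (fun m => '\n' :: m)))
          = pvRepl c (mt ++ r.flatMap (fun m => '\n' :: m)) := by
        simp [pvRepl, hbc]
      have h2 : pvGoC c cur ((b :: mt) :: r) = pvGoC c (cur ++ mt) r := by
        simp [pvGoC, hbc]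
      rw [h1, ih hr mt hmt, h2, pvGoC_eq c r mt, pvGoC_eq c r (cur ++ mt)]
      simp [pvMyJ]
    · have h1 : pvRepl c ('\n' :: b :: (mt ++ r.flatMap (fun m => '\n' :: m)))
          = '\n' :: pvRepl c ((b :: mt) ++ r.flatMap (fun m => '\n' :: m)) := by
        simp [pvRepl, hbc]
      rw [h1, ih hr (b :: mt) hm.2]
      have h2 : pvGoC c cur ((b :: mt) :: r) = cur :: pvGoC c (b :: mt) r := by
        simp [pvGoC, hbc]
      rw [h2, pvGoC_eq c r (b :: mt)]
      simp [pvMyJ]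

theorem pvRepl_join (c : Char) (ls : List (List Char)) (h : ∀ l ∈ ls, pvGood l) :
    pvRepl c (pvMyJ ls) = pvMyJ (pvMergeC c ls) := by
  cases ls with
  | nil => simp [pvMyJ, pvRepl, pvMergeC]
  | cons l t =>
    have hl : pvGood l := h l List.mem_cons_self
    have ht : ∀ x ∈ t, pvGood x := fun x hx => h x (List.mem_cons_of_mem _ hx)
    show pvRepl c (l ++ t.flatMap (fun m => '\n' :: m)) = pvMyJ (pvGoC c l t)
    exact pvRepl_join_aux c t ht l hl.2

-- ---------- goodness is preserved by merging ----------

theorem pvGoC_good (c : Char) :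
    ∀ (rest : List (List Char)), (∀ m ∈ rest, pvGood m) →
      ∀ (cur : List Char), pvGood cur → ∀ p ∈ pvGoC c cur rest, pvGood p := by
  intro rest
  induction rest with
  | nil =>
    intro _ cur hcur p hp
    simp only [pvGoC, List.mem_singleton] at hp
    subst hp; exact hcur
  | cons l r ih =>
    intro hg cur hcur p hp
    have hl : pvGood l := hg l List.mem_cons_self
    have hr : ∀ x ∈ r, pvGood x := fun x hx => hg x (List.mem_cons_of_mem _ hx)
    by_cases h : l.head? = some c
    · simp only [pvGoC, if_pos h] at hp
      have hcur' : pvGood (cur ++ l.tail) := by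
        refine ⟨by simp [hcur.1], ?_⟩
        intro hmem
        rcases List.mem_append.mp hmem with hx | hx
        · exact hcur.2 hx
        · exact hl.2 (List.tail_subset l hx)
      exact ih hr (cur ++ l.tail) hcur' p hp
    · simp only [pvGoC, if_neg h] at hp
      rcases List.mem_cons.mp hp with h1 | h1
      · subst h1; exact hcur
      · exact ih hr l hl p h1

theorem pvMergeC_good (c : Char) (ls : List (List Char)) (h : ∀ l ∈ ls, pvGood l) :
    ∀ p ∈ pvMergeC c ls, pvGood p := by
  cases ls with
  | nil => intro p hp; simp [pvMergeC] at hp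
  | cons l t =>
    exact pvGoC_good c t (fun x hx => h x (List.mem_cons_of_mem _ hx)) l
      (h l List.mem_cons_self)

-- ---------- facts about the leading c-run ----------

theorem pvDropC_subset (c : Char) :
    ∀ (r : List (List Char)), ∀ p ∈ pvDropC c r, p ∈ r := by
  intro r
  induction r with
  | nil => intro p hp; simp [pvDropC] at hp
  | cons l r' ih =>
    intro p hp
    by_cases h : l.head? = some c
    · simp only [pvDropC, if_pos h] at hp
      exact List.mem_cons_of_mem _ (ih p hp)
    · simp only [pvDropC, if_neg h] at hp
      exact hp

theorem pvDropC_length (c : Char) :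
    ∀ (r : List (List Char)), (pvDropC c r).length ≤ r.length := by
  intro r
  induction r with
  | nil => simp [pvDropC]
  | cons l r' ih =>
    by_cases h : l.head? = some c
    · simp only [pvDropC, if_pos h]
      exact le_trans ih (by simp)
    · simp [pvDropC, if_neg h]

theorem pvDropC_head (c : Char) :
    ∀ (r : List (List Char)) (m : List Char) (r'' : List (List Char)),
      pvDropC c r = m :: r'' → ¬ (m.head? = some c) := by
  intro r
  induction r with
  | nil => intro m r'' h; simp [pvDropC] at h
  | cons l r' ih =>
    intro m r'' h
    by_cases hl : l.head? = some c
    · simp only [pvDropC, if_pos hl] at h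
      exact ih m r'' h
    · simp only [pvDropC, if_neg hl] at h
      injection h with h1 _
      rw [← h1]; exact hl

-- swapping the tab-merge inside: valid when the list starts (if at all) with a non-space head
theorem pvSwap (sD : List (List Char)) (X : List Char)
    (h : ∀ (m : List Char) (r'' : List (List Char)), sD = m :: r'' → ¬ (m.head? = some ' ')) :
    pvGoC '\t' X (pvMergeC ' ' sD) = pvMergeC '\t' (pvGoC ' ' X sD) := by
  cases sD with
  | nil => simp [pvMergeC, pvGoC]
  | cons m r'' =>
    have hm : ¬ (m.head? = some ' ') := h m r'' rfl
    simp only [pvMergeC, pvGoC, if_neg hm]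

-- pvSpec1 consumes a leading run of space-headed lines
theorem pvSpec1_run :
    ∀ (r : List (List Char)) (X : List Char),
      pvSpec1 X r = pvSpec1 (X ++ pvTailsC ' ' r) (pvDropC ' ' r) := by
  intro r
  induction r with
  | nil => intro X; simp [pvTailsC, pvDropC]
  | cons m r' ih =>
    intro X
    by_cases h : m.head? = some ' '
    · obtain ⟨mt, rfl⟩ : ∃ mt, m = ' ' :: mt := by
        cases m with
        | nil => simp at h
        | cons a mt => simp at h; subst h; exact ⟨mt, rfl⟩
      have hf : pvIsFold (' ' :: mt) = true := by simp [pvIsFold]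
      simp only [pvSpec1, hf, if_true, List.tail_cons]
      rw [ih (X ++ mt)]
      simp only [pvTailsC, pvDropC, h, if_pos, List.tail_cons]
      simp [List.append_assoc]
    · simp only [pvTailsC, pvDropC, if_neg h]
      simp

-- the space-merge then tab-merge computes pvSpec1
theorem pvMT_goS :
    ∀ (n : Nat) (rest : List (List Char)), rest.length ≤ n → (∀ m ∈ rest, m ≠ []) →
      ∀ (cur : List Char), pvMergeC '\t' (pvGoC ' ' cur rest) = pvSpec1 cur rest := by
  intro n
  induction n with
  | zero =>
    intro rest hlen _ cur
    have hnil : rest = [] := by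
      cases rest with
      | nil => rfl
      | cons a b => simp at hlen
    subst hnil
    simp [pvGoC, pvMergeC, pvSpec1]
  | succ n ih =>
    intro rest hlen hne cur
    cases rest with
    | nil => simp [pvGoC, pvMergeC, pvSpec1]
    | cons l r =>
      have hl : l ≠ [] := hne l List.mem_cons_self
      have hr : ∀ m ∈ r, m ≠ [] := fun m hm => hne m (List.mem_cons_of_mem _ hm)
      have hrlen : r.length ≤ n := by simp at hlen; omega
      obtain ⟨b, lt, rfl⟩ : ∃ b lt, l = b :: lt := by
        cases l with
        | nil => exact absurd rfl hl
        | cons b lt => exact ⟨b, lt, rfl⟩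
      by_cases hbs : b = ' '
      · subst hbs
        have hh : (' ' :: lt : List Char).head? = some ' ' := rfl
        have hf : pvIsFold (' ' :: lt) = true := by simp [pvIsFold]
        simp only [pvGoC, hh, if_pos rfl, List.tail_cons, pvSpec1, hf, if_true]
        exact ih r hrlen hr (cur ++ lt)
      · have hh : ¬ ((b :: lt : List Char).head? = some ' ') := by simp [hbs]
        simp only [pvGoC, if_neg hh]
        have hstep : pvMergeC '\t' (cur :: pvGoC ' ' (b :: lt) r)
            = pvGoC '\t' cur (pvGoC ' ' (b :: lt) r) := rfl
        rw [hstep, pvGoC_eq ' ' r (b :: lt)]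
        have hDhead := pvDropC_head ' ' r
        have hDlen : (pvDropC ' ' r).length ≤ n := le_trans (pvDropC_length ' ' r) hrlen
        have hDne : ∀ m ∈ pvDropC ' ' r, m ≠ [] := fun m hm => hr m (pvDropC_subset ' ' r m hm)
        by_cases hbt : b = '\t'
        · subst hbt
          have hh2 : ((('\t' :: lt) ++ pvTailsC ' ' r : List Char)).head? = some '\t' := rfl
          simp only [pvGoC, hh2, if_pos rfl, List.cons_append, List.tail_cons]
          rw [pvSwap (pvDropC ' ' r) (cur ++ (lt ++ pvTailsC ' ' r)) hDhead,
              ih (pvDropC ' ' r) hDlen hDne (cur ++ (lt ++ pvTailsC ' ' r))]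
          have hf : pvIsFold ('\t' :: lt) = true := by simp [pvIsFold]
          simp only [pvSpec1, hf, if_true, List.tail_cons]
          rw [pvSpec1_run r (cur ++ lt)]
          simp [List.append_assoc]
        · have hh2 : ¬ ((((b :: lt) ++ pvTailsC ' ' r : List Char)).head? = some '\t') := by
            simp [hbt]
          simp only [pvGoC, if_neg hh2]
          rw [pvSwap (pvDropC ' ' r) ((b :: lt) ++ pvTailsC ' ' r) hDhead,
              ih (pvDropC ' ' r) hDlen hDne ((b :: lt) ++ pvTailsC ' ' r)]
          have hf : pvIsFold (b :: lt) = false := by simp [pvIsFold, hbs, hbt]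
          simp only [pvSpec1, hf, Bool.false_eq_true, if_false]
          rw [pvSpec1_run r (b :: lt)]

theorem pvM (ls : List (List Char)) (hne : ∀ m ∈ ls, m ≠ []) :
    pvMergeC '\t' (pvMergeC ' ' ls) = pvSpec ls := by
  cases ls with
  | nil => rfl
  | cons l rest =>
    show pvMergeC '\t' (pvGoC ' ' l rest) = pvSpec1 l rest
    exact pvMT_goS rest.length rest le_rfl
      (fun m hm => hne m (List.mem_cons_of_mem _ hm)) l

-- ---------- splitting a joined newline-free list is the identity ----------

theorem pvSplitP_skip (w r : List Char) (hw : '\n' ∉ w) :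
    pvSplitP (w ++ r) = (w ++ (pvSplitP r).1, (pvSplitP r).2) := by
  induction w with
  | nil => simp
  | cons a w' ih =>
    have ha : ¬ (a = '\n') := by intro h; subst h; simp at hw
    have hw' : '\n' ∉ w' := by simp at hw; exact hw.2
    simp only [List.cons_append, pvSplitP, if_neg ha, ih hw']

theorem pvSplitP_flat :
    ∀ (t : List (List Char)), (∀ m ∈ t, '\n' ∉ m) →
      pvSplitP (t.flatMap (fun m => '\n' :: m)) = ([], t) := by
  intro t
  induction t with
  | nil => intro _; simp [pvSplitP]
  | cons m r ih =>
    intro h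
    have hm : '\n' ∉ m := h m List.mem_cons_self
    have hr : ∀ x ∈ r, '\n' ∉ x := fun x hx => h x (List.mem_cons_of_mem _ hx)
    have hflat : (m :: r).flatMap (fun m => '\n' :: m)
        = '\n' :: (m ++ r.flatMap (fun m => '\n' :: m)) := by simp
    have hstep : pvSplitP ('\n' :: (m ++ r.flatMap (fun m => '\n' :: m)))
        = ([], (pvSplitP (m ++ r.flatMap (fun m => '\n' :: m))).1
            :: (pvSplitP (m ++ r.flatMap (fun m => '\n' :: m))).2) := by
      simp [pvSplitP]
    rw [hflat, hstep, pvSplitP_skip m _ hm, ih hr]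
    simp

theorem pvSplit_myJ (y : List Char) (M : List (List Char)) (hy : '\n' ∉ y)
    (hM : ∀ p ∈ M, '\n' ∉ p) :
    PySem.Chars.splitOn (pvMyJ (y :: M)) ['\n'] = y :: M := by
  rw [pvSplitOnEq]
  have h : pvSplitP (pvMyJ (y :: M)) = (y, M) := by
    show pvSplitP (y ++ M.flatMap (fun m => '\n' :: m)) = _
    rw [pvSplitP_skip _ _ hy, pvSplitP_flat M hM]
    simp
  rw [h]

-- ---------- assembly ----------

theorem pvMain (s : List Char) :
    (List.foldl pvStepA [] (PySem.Chars.splitOn s ['\n'])).map String.mk =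
      (let lines := (PySem.Chars.splitOn s ['\n']).filter (fun l => !l.isEmpty)
       if lines.isEmpty then []
       else
        (PySem.Chars.splitOn
          (PySem.Chars.replace
            (PySem.Chars.replace (PySem.Chars.join ['\n'] lines) ['\n', ' '] [])
            ['\n', '\t'] [])
          ['\n']).map String.mk) := by
  simp only []
  have hA : List.foldl pvStepA [] (PySem.Chars.splitOn s ['\n'])
      = pvSpec ((PySem.Chars.splitOn s ['\n']).filter (fun l => !l.isEmpty)) := by
    rw [← pvFoldA _ (pvFilter_ne (PySem.Chars.splitOn s ['\n']))]
    rw [List.foldl_filter, pvStepA_guard]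
  rw [hA]
  have hgoodall : ∀ l ∈ (PySem.Chars.splitOn s ['\n']).filter (fun l => !l.isEmpty), pvGood l := by
    intro l hlmem
    refine ⟨pvFilter_ne _ l hlmem, ?_⟩
    have hmem : l ∈ PySem.Chars.splitOn s ['\n'] := (List.mem_filter.mp hlmem).1
    rw [pvSplitOnEq] at hmem
    rcases List.mem_cons.mp hmem with h | h
    · subst h; exact (pvSplitP_good s).1
    · exact (pvSplitP_good s).2 l h
  rcases hq : (PySem.Chars.splitOn s ['\n']).filter (fun l => !l.isEmpty) with _ | ⟨h, t⟩
  · rw [hq]; simp [pvSpec]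
  · rw [hq] at hgoodall
    rw [hq]
    have hgood2 : ∀ p ∈ pvMergeC ' ' (h :: t), pvGood p := pvMergeC_good ' ' _ hgoodall
    rw [if_neg (by simp)]
    rw [pvJoinEq, pvReplaceEq ' ', pvRepl_join ' ' _ hgoodall,
        pvReplaceEq '\t', pvRepl_join '\t' _ hgood2]
    have hcons : ∃ y M, pvMergeC '\t' (pvMergeC ' ' (h :: t)) = y :: M := by
      rw [show pvMergeC ' ' (h :: t) = pvGoC ' ' h t from rfl, pvGoC_eq ' ' t h]
      rw [show pvMergeC '\t' ((h ++ pvTailsC ' ' t) :: pvMergeC ' ' (pvDropC ' ' t))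
            = pvGoC '\t' (h ++ pvTailsC ' ' t) (pvMergeC ' ' (pvDropC ' ' t)) from rfl]
      rw [pvGoC_eq '\t' _ _]
      exact ⟨_, _, rfl⟩
    obtain ⟨y, M, hYM⟩ := hcons
    have hgood3 : ∀ p ∈ y :: M, pvGood p := by
      rw [← hYM]; exact pvMergeC_good '\t' _ hgood2
    rw [hYM,
        pvSplit_myJ y M (hgood3 y List.mem_cons_self).2
          (fun p hp => (hgood3 p (List.mem_cons_of_mem _ hp)).2),
        ← hYM, pvM _ (fun m hm => (hgoodall m hm).1)]

-- ===== VERDICT =====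
theorem unfold_ics_lines_spec : Claim_equal_unfold_ics_lines := by
  intro text _
  unfold Spec_unfold_ics_lines unfold_ics_lines unfold_ics_lines_alt
  exact pvMain
    (PySem.Chars.replace (PySem.Chars.replace text.toList ['\r', '\n'] ['\n']) ['\r'] ['\n'])
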